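-- pv_equiv track=rewrite | github.com/shpinc/CV-Modify-Picture | Image Modification/cod/main.py | functie
-- ===== SOURCE A (Python) =====
-- def functie(A):
--     Suma = A
--     n = len(A)
--
--     for i in range(1, n):
--         for j in range(0, n):
--             mn_val = Suma[i - 1][j]
--             if (j > 0):
--                 mn_val = min(mn_val, Suma[i - 1][j - 1])
--             if (j + 1 < n):
--                 mn_val = min(mn_val, Suma[i - 1][j + 1])
--
--             Suma[i][j] = A[i][j] + mn_val
--
--     road = []
--     y = 0
--
--     for j in range(0, n):
--         if (Suma[n - 1][j] < Suma[n - 1][y]):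
--             y = j
--
--     road.append((n - 1, y))
--
--     for x in range(n - 1, 0, -1):
--         mn_val = Suma[x - 1][y]
--         direction = 0
--
--         if (y > 0 and Suma[x - 1][y - 1] < mn_val):
--             mn_val = Suma[x - 1][y - 1]
--             direction = -1
--         if (y + 1 < n and Suma[x - 1][y + 1] < mn_val):
--             mn_val = Suma[x - 1][y + 1]
--             direction = +1
--
--         y += direction
--         road.append((x - 1, y))
--
--     road.reverse
--     return (road)
-- ===== SOURCE B (Python) =====
-- # Same forward DP (mutating A in place like the original, via the Suma alias),
-- # but records a parent/column table during the pass and backtracks by pointer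
-- # lookups instead of recomputing the three-way minimum; road stays bottom-to-top
-- # (the original's `road.reverse` without parentheses never reverses).
-- def _choose(prev, n, j):
--     # best predecessor value and column for cell column j, with the
--     # straight / left / right strict-< tie-break
--     best = prev[j]
--     p = j
--     if j > 0 and prev[j - 1] < best:
--         best = prev[j - 1]
--         p = j - 1
--     if j + 1 < n and prev[j + 1] < best:
--         best = prev[j + 1]
--         p = j + 1
--     return best, p
--
--
-- def functie(A):
--     n = len(A)
--     parent = [[0] * n]  # row 0 has no predecessor
--     for i in range(1, n):
--         prev = A[i - 1]
--         row = []
--         for j in range(n):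
--             best, p = _choose(prev, n, j)
--             row.append(p)
--             A[i][j] += best
--         parent.append(row)
--
--     y = 0
--     for j in range(1, n):
--         if A[n - 1][j] < A[n - 1][y]:
--             y = j
--
--     road = [(n - 1, y)]
--     for x in range(n - 1, 0, -1):
--         y = parent[x][y]
--         road.append((x - 1, y))
--     return road
-- ===== Notes on version B (the rewrite author's own statement) =====
-- stated objective: alternative
-- what changed: B keeps the forward DP but records a parent-column table during the pass and backtracks by table lookups instead of recomputing the three-way strict minimum at each step; both mutate the argument grid in place identically.
import Mathlib
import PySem

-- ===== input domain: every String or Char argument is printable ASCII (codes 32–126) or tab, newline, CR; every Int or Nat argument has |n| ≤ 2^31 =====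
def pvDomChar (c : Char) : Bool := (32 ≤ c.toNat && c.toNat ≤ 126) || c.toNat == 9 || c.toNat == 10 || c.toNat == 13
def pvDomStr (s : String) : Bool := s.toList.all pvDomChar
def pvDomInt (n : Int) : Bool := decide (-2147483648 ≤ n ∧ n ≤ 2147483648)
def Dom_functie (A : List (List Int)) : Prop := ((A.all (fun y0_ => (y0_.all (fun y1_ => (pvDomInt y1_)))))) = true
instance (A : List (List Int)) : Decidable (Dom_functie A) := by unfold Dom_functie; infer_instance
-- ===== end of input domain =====

-- B keeps A's forward DP (including the in-place mutation of the argument in Python;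
-- here only return values are compared) but records a parent-column table and
-- backtracks by table lookups instead of recomputing the three-way minimum;
-- the road stays bottom-to-top, as A's no-op `road.reverse` leaves it.

-- shared tiny primitives: 2-D read / write on a list of rows
def g2 (S : List (List Int)) (i j : Nat) : Int := (S.getD i []).getD j 0
def s2 (S : List (List Int)) (i j : Nat) (v : Int) : List (List Int) :=
  S.set i ((S.getD i []).set j v)
-- the last-row minimum scan (identical statement lines in both Pythons)
def scanY (W : List (List Int)) (n : Nat) (y j : Nat) : Nat :=
  if g2 W (n-1) j < g2 W (n-1) y then j else y

-- ===== PORT A =====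
-- inner DP body: mn_val accumulation with Python's min, then Suma[i][j] = A[i][j] + mn_val
def innA (n i : Nat) (S : List (List Int)) (j : Nat) : List (List Int) :=
  let mn0 := g2 S (i-1) j
  let mn1 := if 0 < j then min mn0 (g2 S (i-1) (j-1)) else mn0
  let mn2 := if j+1 < n then min mn1 (g2 S (i-1) (j+1)) else mn1
  s2 S i j (g2 S i j + mn2)

def stepA (n : Nat) (S : List (List Int)) (i : Nat) : List (List Int) :=
  (List.range n).foldl (innA n i) S

-- backtrack body: recompute the strict-< three-way choice from Suma, y += direction
def backA (n : Nat) (W : List (List Int)) (st : List (Int × Int) × Nat) (x : Nat) :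
    List (Int × Int) × Nat :=
  let mn0 := g2 W (x-1) st.2
  let r1 := if 0 < st.2 ∧ g2 W (x-1) (st.2-1) < mn0
            then (g2 W (x-1) (st.2-1), st.2-1) else (mn0, st.2)
  let y2 := if st.2+1 < n ∧ g2 W (x-1) (st.2+1) < r1.1 then st.2+1 else r1.2
  (st.1 ++ [((x:Int)-1, (y2:Int))], y2)

def functie (A : List (List Int)) : List (Int × Int) :=
  let n := A.length
  let W := (List.range' 1 (n-1)).foldl (stepA n) A
  let y := (List.range n).foldl (scanY W n) 0
  ((List.range' 1 (n-1)).reverse.foldl (backA n W) ([((n:Int)-1, (y:Int))], y)).1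

-- ===== PORT B =====
-- _choose: best predecessor value and column with the straight/left/right strict-< tie-break
def chooseB (prev : List Int) (n j : Nat) : Int × Nat :=
  let b0 := prev.getD j 0
  let r1 := if 0 < j ∧ prev.getD (j-1) 0 < b0 then (prev.getD (j-1) 0, j-1) else (b0, j)
  if j+1 < n ∧ prev.getD (j+1) 0 < r1.1 then (prev.getD (j+1) 0, j+1) else r1

-- inner loop of B: update row i of the grid and append the parent column to `row`
def innB (n i : Nat) (prev : List Int) (st : List (List Int) × List Nat) (j : Nat) :
    List (List Int) × List Nat :=
  let c := chooseB prev n j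
  (s2 st.1 i j (g2 st.1 i j + c.1), st.2 ++ [c.2])

def stepB (n : Nat) (st : List (List Int) × List (List Nat)) (i : Nat) :
    List (List Int) × List (List Nat) :=
  let prev := st.1.getD (i-1) []
  let r := (List.range n).foldl (innB n i prev) (st.1, [])
  (r.1, st.2 ++ [r.2])

-- backtrack body of B: pointer lookup in the parent table
def backB (parent : List (List Nat)) (st : List (Int × Int) × Nat) (x : Nat) :
    List (Int × Int) × Nat :=
  let y := (parent.getD x []).getD st.2 0
  (st.1 ++ [((x:Int)-1, (y:Int))], y)

def functie_alt (A : List (List Int)) : List (Int × Int) :=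
  let n := A.length
  let r := (List.range' 1 (n-1)).foldl (stepB n) (A, [List.replicate n 0])
  let y := (List.range' 1 (n-1)).foldl (scanY r.1 n) 0
  ((List.range' 1 (n-1)).reverse.foldl (backB r.2) ([((n:Int)-1, (y:Int))], y)).1

-- ===== PRECONDITION & SPEC =====
-- Pre_ excludes exactly the inputs where Python A raises IndexError: some row shorter
-- than the number of rows (the DP indexes columns 0..n-1 of every row).
def Pre_functie (A : List (List Int)) : Prop := ∀ r ∈ A, A.length ≤ r.length
instance (A : List (List Int)) : Decidable (Pre_functie A) := by unfold Pre_functie; infer_instance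
def pvWitness_functie : List (List Int) := [[1, 2], [3, 4]]

def Spec_functie (A : List (List Int)) (out : List (Int × Int)) : Prop := out = functie_alt A
instance (A : List (List Int)) (out : List (Int × Int)) : Decidable (Spec_functie A out) := by unfold Spec_functie; infer_instance

-- ===== CLAIM (what is proved, stated in full; the proofs are below) =====
def Claim_equal_functie : Prop := ∀ (A : List (List Int)), Dom_functie A → Pre_functie A → Spec_functie A (functie A)

-- ===== LEMMAS AND PROOFS =====

-- s2 leaves other rows alone
theorem g2_s2_ne (S : List (List Int)) (i j : Nat) (v : Int) (r : Nat) (h : r ≠ i) :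
    ((s2 S i j v).getD r []) = S.getD r [] := by
  simp only [s2, List.getD]
  rw [List.getElem?_set_ne (by omega)]

-- the strict-< chain of chooseB computes the same best value as A's min chain
theorem innA_eq_chooseB (n i : Nat) (prev : List Int) (S : List (List Int))
    (h : S.getD (i-1) [] = prev) (j : Nat) :
    innA n i S j = s2 S i j (g2 S i j + (chooseB prev n j).1) := by
  subst h
  have hv : (let mn0 := g2 S (i-1) j
             let mn1 := if 0 < j then min mn0 (g2 S (i-1) (j-1)) else mn0
             if j+1 < n then min mn1 (g2 S (i-1) (j+1)) else mn1)
      = (chooseB (S.getD (i-1) []) n j).1 := by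
    simp only [chooseB, g2]
    split_ifs <;> simp_all <;> omega
  simp only [innA]
  rw [hv]

-- the parent column is in range
theorem chooseB_snd_lt (prev : List Int) (n j : Nat) (hj : j < n) :
    (chooseB prev n j).2 < n := by
  simp only [chooseB]
  split_ifs <;> simp <;> omega

-- A's backtrack step computes exactly chooseB's column
theorem backA_eq (n : Nat) (W : List (List Int)) (st : List (Int × Int) × Nat) (x : Nat) :
    backA n W st x =
      (st.1 ++ [((x:Int)-1, ((chooseB (W.getD (x-1) []) n st.2).2 : Int))],
       (chooseB (W.getD (x-1) []) n st.2).2) := by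
  simp only [backA, chooseB, g2, apply_ite (f := Prod.snd)]

-- a product-shaped foldl splits componentwise
theorem foldl_prod {α β γ : Type} (f : α → γ → α) (g : β → γ → β) (js : List γ) (a : α) (b : β) :
    js.foldl (fun p j => (f p.1 j, g p.2 j)) (a, b) = (js.foldl f a, js.foldl g b) := by
  induction js generalizing a b with
  | nil => rfl
  | cons j js ih => simp [List.foldl_cons, ih]

-- building a list by appends is a map
theorem foldl_append_map {β γ : Type} (c : γ → β) (js : List γ) (r0 : List β) :
    js.foldl (fun r j => r ++ [c j]) r0 = r0 ++ js.map c := by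
  induction js generalizing r0 with
  | nil => simp
  | cons j js ih => simp [List.foldl_cons, ih]

-- innB splits into its grid part and its row part
theorem innB_split (n i : Nat) (prev : List Int) (js : List Nat) (S : List (List Int)) (r : List Nat) :
    js.foldl (innB n i prev) (S, r) =
      (js.foldl (fun S j => s2 S i j (g2 S i j + (chooseB prev n j).1)) S,
       r ++ js.map (fun j => (chooseB prev n j).2)) := by
  rw [← foldl_append_map (fun j => (chooseB prev n j).2) js r]
  exact foldl_prod (fun S j => s2 S i j (g2 S i j + (chooseB prev n j).1))
    (fun r j => r ++ [(chooseB prev n j).2]) js S r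

-- the grid part of B's inner loop equals A's inner loop
theorem inner_eq (n i : Nat) (hi : 1 ≤ i) (prev : List Int) :
    ∀ (js : List Nat) (S : List (List Int)), S.getD (i-1) [] = prev →
      js.foldl (innA n i) S =
        js.foldl (fun S j => s2 S i j (g2 S i j + (chooseB prev n j).1)) S := by
  intro js
  induction js with
  | nil => intro S h; rfl
  | cons j js ih =>
    intro S h
    simp only [List.foldl_cons]
    rw [innA_eq_chooseB n i prev S h j]
    exact ih _ (by rw [g2_s2_ne _ _ _ _ _ (by omega)]; exact h)

-- one outer step: the grids agree
theorem stepAB (n : Nat) (S : List (List Int)) (P : List (List Nat)) (i : Nat) (hi : 1 ≤ i) :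
    stepA n S i = (stepB n (S, P) i).1 := by
  simp only [stepA, stepB, innB_split]
  exact inner_eq n i hi _ (List.range n) S rfl

-- full outer fold: the grids agree
theorem outer_eq (n : Nat) (is : List Nat) :
    ∀ (S : List (List Int)) (P : List (List Nat)), (∀ i ∈ is, 1 ≤ i) →
      is.foldl (stepA n) S = (is.foldl (stepB n) (S, P)).1 := by
  induction is with
  | nil => intro S P h; rfl
  | cons i is ih =>
    intro S P h
    simp only [List.foldl_cons]
    rw [stepAB n S P i (h i (by simp))]
    have := ih (stepB n (S, P) i).1 (stepB n (S, P) i).2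
      (fun x hx => h x (by simp [hx]))
    simpa using this

-- stepB only touches grid row i
theorem stepB_grid_ne (n : Nat) (st : List (List Int) × List (List Nat)) (i r : Nat) (h : r ≠ i) :
    ((stepB n st i).1.getD r []) = st.1.getD r [] := by
  simp only [stepB, innB_split]
  have : ∀ (js : List Nat) (S : List (List Int)),
      ((js.foldl (fun S j => s2 S i j (g2 S i j + (chooseB (st.1.getD (i-1) []) n j).1)) S).getD r [])
        = S.getD r [] := by
    intro js
    induction js with
    | nil => intro S; rfl
    | cons j js ih =>
      intro S
      simp only [List.foldl_cons]
      rw [ih, g2_s2_ne _ _ _ _ _ h]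
  exact this _ _

theorem fold_stepB_grid_ne (n : Nat) (is : List Nat) :
    ∀ (st : List (List Int) × List (List Nat)) (r : Nat), (∀ i ∈ is, i ≠ r) →
      ((is.foldl (stepB n) st).1.getD r []) = st.1.getD r [] := by
  induction is with
  | nil => intro st r h; rfl
  | cons i is ih =>
    intro st r h
    simp only [List.foldl_cons]
    rw [ih _ _ (fun x hx => h x (by simp [hx])),
        stepB_grid_ne n st i r (fun he => (h i (by simp)) he.symm)]

-- stepB appends one parent row
theorem stepB_parent_len (n : Nat) (st : List (List Int) × List (List Nat)) (i : Nat) :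
    (stepB n st i).2.length = st.2.length + 1 := by
  simp [stepB]

theorem fold_stepB_parent_len (n : Nat) (is : List Nat) :
    ∀ (st : List (List Int) × List (List Nat)),
      (is.foldl (stepB n) st).2.length = st.2.length + is.length := by
  induction is with
  | nil => intro st; simp
  | cons i is ih =>
    intro st
    simp only [List.foldl_cons, ih, stepB_parent_len, List.length_cons]
    omega

-- existing parent rows are preserved
theorem fold_stepB_parent_ne (n : Nat) (is : List Nat) :
    ∀ (st : List (List Int) × List (List Nat)) (x : Nat), x < st.2.length →
      ((is.foldl (stepB n) st).2.getD x []) = st.2.getD x [] := by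
  induction is with
  | nil => intro st x hx; rfl
  | cons i is ih =>
    intro st x hx
    simp only [List.foldl_cons]
    rw [ih _ _ (by rw [stepB_parent_len]; omega)]
    simp only [stepB]
    simp [List.getD, List.getElem?_append_left hx]

-- the parent table is the chooseB table of the final grid
theorem parent_correct (n : Nat) (A : List (List Int)) (x : Nat) (hx1 : 1 ≤ x) (hx2 : x < n) :
    ((List.range' 1 (n-1)).foldl (stepB n) (A, [List.replicate n 0])).2.getD x [] =
      (List.range n).map (fun j =>
        (chooseB (((List.range' 1 (n-1)).foldl (stepB n) (A, [List.replicate n 0])).1.getD (x-1) []) n j).2) := by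
  have h2 : List.range' x (n-x) = x :: List.range' (x+1) (n-x-1) := by
    obtain ⟨k, hk⟩ : ∃ k, n - x = k + 1 := ⟨n-x-1, by omega⟩
    rw [hk, List.range'_succ]
    simp
  have hsplit : List.range' 1 (n-1) = List.range' 1 (x-1) ++ (x :: List.range' (x+1) (n-x-1)) := by
    rw [← h2]
    have h3 : List.range' 1 (x-1) ++ List.range' (1 + 1*(x-1)) (n-x) = List.range' 1 ((x-1)+(n-x)) :=
      List.range'_append
    rw [show 1 + 1*(x-1) = x from by omega] at h3
    rw [h3]
    congr 1
    omega
  rw [hsplit, List.foldl_append, List.foldl_cons]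
  have hlen1 : ((List.range' 1 (x-1)).foldl (stepB n) (A, [List.replicate n 0])).2.length = x := by
    rw [fold_stepB_parent_len]
    simp [List.length_range']
    omega
  rw [fold_stepB_parent_ne n _ _ x (by rw [stepB_parent_len]; omega),
      fold_stepB_grid_ne n _ _ (x-1) (by intro i hi; rw [List.mem_range'] at hi; omega),
      stepB_grid_ne n _ x (x-1) (by omega)]
  simp only [stepB, innB_split]
  have hgd : ∀ (P : List (List Nat)) (row : List Nat), P.length = x → (P ++ [row]).getD x [] = row := by
    intro P row hP
    rw [← hP]
    simp [List.getD]
  exact hgd _ _ hlen1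

-- the two last-row scans agree
theorem scan_eq (W : List (List Int)) (n : Nat) (hn : 1 ≤ n) :
    (List.range n).foldl (scanY W n) 0 = (List.range' 1 (n-1)).foldl (scanY W n) 0 := by
  obtain ⟨m, rfl⟩ : ∃ m, n = m + 1 := ⟨n - 1, by omega⟩
  rw [List.range_eq_range', List.range'_succ, List.foldl_cons]
  simp [scanY]

-- the scan stays below n
theorem scan_lt (W : List (List Int)) (n : Nat) (hn : 1 ≤ n) :
    (List.range' 1 (n-1)).foldl (scanY W n) 0 < n := by
  have key : ∀ (js : List Nat) (y : Nat), (∀ j ∈ js, j < n) → y < n →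
      js.foldl (scanY W n) y < n := by
    intro js
    induction js with
    | nil => intro y _ hy; exact hy
    | cons j js ih =>
      intro y h hy
      simp only [List.foldl_cons, scanY]
      split
      · exact ih _ (fun x hx => h x (by simp [hx])) (h j (by simp))
      · exact ih _ (fun x hx => h x (by simp [hx])) hy
  exact key _ 0 (by intro j hj; rw [List.mem_range'] at hj; omega) hn

-- the two backtracks agree
theorem back_eq (n : Nat) (A : List (List Int)) (xs : List Nat) :
    ∀ (road : List (Int × Int)) (y : Nat), (∀ x ∈ xs, 1 ≤ x ∧ x < n) → y < n →
      xs.foldl (backA n (((List.range' 1 (n-1)).foldl (stepB n) (A, [List.replicate n 0])).1)) (road, y) =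
      xs.foldl (backB (((List.range' 1 (n-1)).foldl (stepB n) (A, [List.replicate n 0])).2)) (road, y) := by
  induction xs with
  | nil => intro road y _ _; rfl
  | cons x xs ih =>
    intro road y h hy
    obtain ⟨hx1, hx2⟩ := h x (by simp)
    simp only [List.foldl_cons]
    have hb : backB (((List.range' 1 (n-1)).foldl (stepB n) (A, [List.replicate n 0])).2) (road, y) x
        = (road ++ [((x:Int)-1,
            ((chooseB (((List.range' 1 (n-1)).foldl (stepB n) (A, [List.replicate n 0])).1.getD (x-1) []) n y).2 : Int))],
           (chooseB (((List.range' 1 (n-1)).foldl (stepB n) (A, [List.replicate n 0])).1.getD (x-1) []) n y).2) := by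
      simp only [backB]
      rw [parent_correct n A x hx1 hx2]
      simp [List.getD, hy]
    rw [backA_eq, hb]
    exact ih _ _ (fun z hz => h z (by simp [hz])) (chooseB_snd_lt _ n y hy)

-- ===== VERDICT (by name: the statement is the Claim_ definition above) =====
theorem functie_spec : Claim_equal_functie := by
  intro A _ _
  unfold Spec_functie
  by_cases hn : A.length = 0
  · have hA : A = [] := List.length_eq_zero_iff.mp hn
    subst hA
    rfl
  · have hn1 : 1 ≤ A.length := by omega
    simp only [functie, functie_alt]
    rw [outer_eq A.length _ A [List.replicate A.length 0]
          (by intro i hi; rw [List.mem_range'] at hi; omega),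
        scan_eq _ A.length hn1]
    exact congrArg Prod.fst
      (back_eq A.length A _ _ _
        (by intro x hx; rw [List.mem_reverse, List.mem_range'] at hx; omega)
        (scan_lt _ A.length hn1))
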